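-- pv_equiv track=rewrite | github.com/stefano-maggiolo/pydepgraph | pydepgraph/__init__.py | find_best_cluster
-- ===== SOURCE A (Python) =====
-- def in_package(mod, pkg):
--     """Return if mod is a subpackage of pkg.
--
--     mod (str): a module name.
--     pkg (str): a package name.
--
--     return (bool): True if mod is a subpackage of pkg.
--
--     """
--     if mod == pkg:
--         return True
--     else:
--         return mod.startswith("%s." % pkg)
--
-- def find_best_cluster(name, clusters):
--     """Return the cluster in clusters which is nearest to name.
--
--     name (str): a package name.
--     clusters ([str]): a list of cluster names.
--
--     return (str): the nearest cluster to name.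
--
--     """
--     best = None
--     for cluster in clusters:
--         if in_package(name, cluster):
--             if best is None:
--                 best = cluster
--             elif in_package(cluster, best):
--                 best = cluster
--     return best
-- ===== SOURCE B (Python) =====
-- def in_package(mod, pkg):
--     """Return if mod is a subpackage of pkg."""
--     if mod == pkg:
--         return True
--     else:
--         return mod.startswith("%s." % pkg)
--
-- def find_best_cluster(name, clusters):
--     """Return the cluster in clusters which is nearest to name.
--
--     Collect all clusters that contain name, then pick the most specific
--     one, which is exactly the longest such cluster name (any two ancestors
--     of name are comparable, so longest = most specific).
--     """
--     candidates = [c for c in clusters if in_package(name, c)]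
--     return max(candidates, key=len) if candidates else None
-- ===== Notes on version B (the rewrite author's own statement) =====
-- stated objective: simpler
-- what changed: Replaces A's running-best loop with its chained subpackage test by a collect-then-select decomposition: filter the clusters containing name, then take the longest with max(key=len), relying on the fact that ancestors of a name are totally ordered by length.
import Mathlib
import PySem

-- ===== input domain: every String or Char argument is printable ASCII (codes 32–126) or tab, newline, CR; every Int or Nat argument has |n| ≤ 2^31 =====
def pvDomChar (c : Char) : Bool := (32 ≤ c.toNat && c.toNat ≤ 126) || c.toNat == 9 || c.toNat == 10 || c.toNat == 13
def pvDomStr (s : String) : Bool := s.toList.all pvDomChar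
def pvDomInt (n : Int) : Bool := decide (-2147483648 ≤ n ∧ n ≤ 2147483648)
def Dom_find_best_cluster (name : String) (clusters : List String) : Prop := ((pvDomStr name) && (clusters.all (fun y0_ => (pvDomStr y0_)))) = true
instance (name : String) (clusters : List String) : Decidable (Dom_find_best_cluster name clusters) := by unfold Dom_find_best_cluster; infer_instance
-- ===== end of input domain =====

-- B replaces A's running-best loop (chained subpackage test) by filter-the-ancestors then
-- pick-the-longest (max by len); objective: simpler decomposition, same cost.


-- ===== PORT A =====
def in_package (mod pkg : String) : Bool :=
  if mod == pkg then true
  else PySem.Str.startswith mod (pkg ++ ".")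

def find_best_cluster (name : String) (clusters : List String) : Option String :=
  clusters.foldl
    (fun best cluster =>
      if in_package name cluster then
        match best with
        | none => some cluster
        | some b => if in_package cluster b then some cluster else some b
      else best)
    none

-- ===== PORT B =====
def find_best_cluster_alt (name : String) (clusters : List String) : Option String :=
  let candidates := clusters.filter (fun c => in_package name c)
  if candidates.isEmpty then none
  else PySem.List.max? candidates (fun c => PySem.Str.len c)

-- ===== PRECONDITION & SPEC =====
def Spec_find_best_cluster (name : String) (clusters : List String) (out : Option String) : Prop := out = find_best_cluster_alt name clusters
instance (name : String) (clusters : List String) (out : Option String) : Decidable (Spec_find_best_cluster name clusters out) := by unfold Spec_find_best_cluster; infer_instance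

-- ===== CLAIM (what is proved, stated in full; the proofs are below) =====
def Claim_equal_find_best_cluster : Prop := ∀ (name : String) (clusters : List String), Dom_find_best_cluster name clusters → Spec_find_best_cluster name clusters (find_best_cluster name clusters)

-- ===== LEMMAS AND PROOFS =====

-- in_package n b says: n = b, or b ++ "." is a prefix of n.
lemma ip_cases {n b : String} (h : in_package n b = true) :
    n = b ∨ b.toList ++ ['.'] <+: n.toList := by
  unfold in_package at h
  split at h
  · exact Or.inl (by simpa using ‹(n == b) = true›)
  · right
    rw [PySem.Str.startswith_eq] at h
    have := (PySem.Chars.startswith_iff _ _).mp h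
    simpa using this

lemma ip_prefix {n b : String} (h : in_package n b = true) : b.toList <+: n.toList := by
  rcases ip_cases h with h | h
  · exact h ▸ List.prefix_refl _
  · exact ((b.toList.prefix_append ['.']).trans h)

-- among two ancestors of n, the strictly longer one is a subpackage of the shorter.
lemma ip_of_lt {n b c : String} (hb : in_package n b = true) (hc : in_package n c = true)
    (hlt : b.toList.length < c.toList.length) : in_package c b = true := by
  rcases ip_cases hb with h | h
  · exact absurd ((List.IsPrefix.length_le (ip_prefix hc)).trans_lt (h ▸ hlt)) (lt_irrefl _)
  · have hpc : b.toList ++ ['.'] <+: c.toList := by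
      refine List.prefix_of_prefix_length_le h (ip_prefix hc) ?_
      simp only [List.length_append, List.length_cons, List.length_nil]
      omega
    unfold in_package
    split
    · rfl
    · rw [PySem.Str.startswith_eq]
      rw [PySem.Chars.startswith_iff]
      simpa using hpc

-- the pointwise agreement of A's update with the max-by-length update, on ancestors of n.
lemma step_eq {n b c : String} (hb : in_package n b = true) (hc : in_package n c = true) :
    (if in_package c b then some c else some b)
      = (if PySem.Str.len b < PySem.Str.len c then some c else some b) := by
  by_cases hlt : b.toList.length < c.toList.length
  · have h2 : PySem.Str.len b < PySem.Str.len c := by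
      rw [PySem.Str.len_eq, PySem.Str.len_eq]; exact_mod_cast hlt
    rw [if_pos (ip_of_lt hb hc hlt), if_pos h2]
  · have h2 : ¬ PySem.Str.len b < PySem.Str.len c := by
      rw [PySem.Str.len_eq, PySem.Str.len_eq]
      intro hcon; exact hlt (by exact_mod_cast hcon)
    rw [if_neg h2]
    by_cases hip : in_package c b = true
    · rcases ip_cases hip with h | h
      · rw [if_pos hip, h]
      · exfalso
        have := List.IsPrefix.length_le h
        simp only [List.length_append, List.length_cons, List.length_nil] at this
        omega
    · rw [if_neg (by simpa using hip)]

-- the two folds agree as long as the list and the accumulator hold only ancestors of n.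
lemma fold_congr (n : String) :
    ∀ (l : List String) (acc : Option String),
      (∀ c ∈ l, in_package n c = true) →
      (∀ b, acc = some b → in_package n b = true) →
      l.foldl
        (fun best cluster =>
          match best with
          | none => some cluster
          | some b => if in_package cluster b then some cluster else some b) acc
      = l.foldl
        (fun acc x =>
          match acc with
          | none => some x
          | some m => if PySem.Str.len m < PySem.Str.len x then some x else some m) acc := by
  intro l
  induction l with
  | nil => intro acc _ _; rfl
  | cons c t ih =>
    intro acc hl hacc
    have hc : in_package n c = true := hl c (List.mem_cons_self ..)
    simp only [List.foldl_cons]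
    cases acc with
    | none =>
      exact ih (some c) (fun x hx => hl x (List.mem_cons_of_mem _ hx))
        (fun b hb => by cases hb; exact hc)
    | some b =>
      have hb : in_package n b = true := hacc b rfl
      have hstep := step_eq (n := n) hb hc
      simp only [hstep]
      refine ih _ (fun x hx => hl x (List.mem_cons_of_mem _ hx)) ?_
      intro x hx
      split at hx <;> (cases hx; first | exact hc | exact hb)

-- ===== VERDICT (by name: the statement is the Claim_ definition above) =====
theorem find_best_cluster_spec : Claim_equal_find_best_cluster := by
  intro name clusters _dom
  unfold Spec_find_best_cluster find_best_cluster find_best_cluster_alt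
  rw [PySem.List.foldl_if_eq_foldl_filter]
  by_cases hE : clusters.filter (fun c => in_package name c) = []
  · simp [hE]
  · rw [if_neg (by simpa [List.isEmpty_iff] using hE)]
    have := fold_congr name (clusters.filter (fun c => in_package name c)) none
      (fun c hc => (List.mem_filter.mp hc).2)
      (fun b hb => by cases hb)
    simp only [PySem.List.max?]
    have hfe : List.filter (in_package name) clusters
        = List.filter (fun c => in_package name c) clusters := rfl
    rw [hfe]
    refine Eq.trans ?_ this.symm |>.symm
    congr 1
    funext a x
    cases a <;> rfl
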